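-- pv_equiv track=rewrite | github.com/ericu/Genotyper | genotyper.py | gameteSetsFromChromosome
-- ===== SOURCE A (Python) =====
-- def gameteSetsFromChromosome(c):
--   if len(c) < 0 or len(c) % 2 != 0:
--     raise "Invalid chromosome length."
--   if len(c) == 0:
--     return [""]
--   a0, a1, tail = c[0], c[1], c[2:]
--   tails = gameteSetsFromChromosome(tail)
--   return [a0+tail for tail in tails] + [a1+tail for tail in tails]
-- ===== SOURCE B (Python) =====
-- def gameteSetsFromChromosome(c):
--   if len(c) < 0 or len(c) % 2 != 0:
--     raise "Invalid chromosome length."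
--   pairs = [(c[i], c[i + 1]) for i in range(0, len(c), 2)]
--   combos = [""]
--   for a0, a1 in pairs:
--     combos = [pre + allele for pre in combos for allele in (a0, a1)]
--   return combos
-- ===== Notes on version B (the rewrite author's own statement) =====
-- stated objective: simpler
-- what changed: Replaces the tail recursion by a flat left-to-right iterative Cartesian-product build: chunk the chromosome into per-locus allele pairs once, then extend a running list of prefixes by each pair in a single loop.
import Mathlib
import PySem

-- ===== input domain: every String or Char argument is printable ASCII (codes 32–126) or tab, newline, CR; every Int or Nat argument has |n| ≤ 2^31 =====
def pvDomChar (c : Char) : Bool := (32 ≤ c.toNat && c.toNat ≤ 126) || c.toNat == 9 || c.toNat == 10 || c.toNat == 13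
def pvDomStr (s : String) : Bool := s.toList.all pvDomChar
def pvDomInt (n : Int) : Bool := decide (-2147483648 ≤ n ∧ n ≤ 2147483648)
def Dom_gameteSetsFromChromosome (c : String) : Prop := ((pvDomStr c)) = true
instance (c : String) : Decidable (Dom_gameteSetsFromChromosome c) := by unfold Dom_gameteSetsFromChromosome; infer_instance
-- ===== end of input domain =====

-- B replaces A's recursion on the tail by a flat iterative Cartesian-product build over per-locus pairs (objective: simpler).

-- ===== PORT A =====
-- recursion of A over the characters; the odd-length case (where A raises) is excluded by Pre_
def gameteAuxA : List Char → List (List Char)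
  | [] => [[]]
  | a0 :: a1 :: tail =>
      let tails := gameteAuxA tail
      tails.map (fun t => a0 :: t) ++ tails.map (fun t => a1 :: t)
  | [_] => []

def gameteSetsFromChromosome (c : String) : List String :=
  (gameteAuxA c.toList).map String.ofList

-- ===== PORT B =====
-- pairs = [(c[i], c[i+1]) for i in range(0, len(c), 2)]
def pairsOfB : List Char → List (Char × Char)
  | a :: b :: t => (a, b) :: pairsOfB t
  | _ => []

def gameteSetsFromChromosome_alt (c : String) : List String :=
  ((pairsOfB c.toList).foldl
      (fun combos p => combos.flatMap (fun pre => [pre ++ [p.1], pre ++ [p.2]]))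
      [[]]).map String.ofList

-- ===== PRECONDITION & SPEC =====
-- A raises (TypeError from `raise "…"`) on odd-length input; Pre_ admits exactly the even lengths.
def Pre_gameteSetsFromChromosome (c : String) : Prop := c.toList.length % 2 = 0
instance (c : String) : Decidable (Pre_gameteSetsFromChromosome c) := by unfold Pre_gameteSetsFromChromosome; infer_instance
def pvWitness_gameteSetsFromChromosome : String := "Ab"

def Spec_gameteSetsFromChromosome (c : String) (out : List String) : Prop := out = gameteSetsFromChromosome_alt c
instance (c : String) (out : List String) : Decidable (Spec_gameteSetsFromChromosome c out) := by unfold Spec_gameteSetsFromChromosome; infer_instance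

-- ===== CLAIM (what is proved, stated in full; the proofs are below) =====
def Claim_equal_gameteSetsFromChromosome : Prop := ∀ (c : String), Dom_gameteSetsFromChromosome c → Pre_gameteSetsFromChromosome c → Spec_gameteSetsFromChromosome c (gameteSetsFromChromosome c)

-- ===== LEMMAS AND PROOFS =====

-- B's foldl, started from any prefix set, appends the right-built product of the remaining pairs
theorem foldl_flat (ps : List (Char × Char)) (acc : List (List Char)) :
    ps.foldl (fun combos p => combos.flatMap (fun pre => [pre ++ [p.1], pre ++ [p.2]])) acc
      = acc.flatMap (fun pre =>
          (ps.foldr (fun p s => s.map (p.1 :: ·) ++ s.map (p.2 :: ·)) [[]]).map (pre ++ ·)) := by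
  induction ps generalizing acc with
  | nil => simp
  | cons p ps ih =>
      simp only [List.foldl_cons, List.foldr_cons, ih]
      rw [List.flatMap_assoc]
      apply List.flatMap_congr
      intro pre _
      simp [Function.comp_def, List.append_assoc]

-- A's recursion equals the right-built product of the pairs, on even length
theorem gameteAuxA_eq (l : List Char) (h : l.length % 2 = 0) :
    gameteAuxA l = (pairsOfB l).foldr (fun p s => s.map (p.1 :: ·) ++ s.map (p.2 :: ·)) [[]] := by
  induction l using gameteAuxA.induct with
  | case1 => simp [gameteAuxA, pairsOfB]
  | case2 a0 a1 tail ih =>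
      simp only [List.length_cons] at h
      have ht : tail.length % 2 = 0 := by omega
      simp [gameteAuxA, pairsOfB, ih ht]
  | case3 x => simp at h

-- ===== VERDICT (by name: the statement is the Claim_ definition above) =====
theorem gameteSetsFromChromosome_spec : Claim_equal_gameteSetsFromChromosome := by
  intro c _ hpre
  unfold Spec_gameteSetsFromChromosome gameteSetsFromChromosome gameteSetsFromChromosome_alt
  rw [foldl_flat, gameteAuxA_eq c.toList hpre]
  simp
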